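-- pv_equiv track=rewrite | github.com/SCappella/riddler | 2020-05-22-states/states.py | count_mackerels
-- ===== SOURCE A (Python) =====
-- def mackerel_state(states, word):
--     mackerel_states = [state for state in states if not (set(state) & set(word))]
--     if len(mackerel_states) == 1:
--         return mackerel_states[0]
--
-- def count_mackerels(states, words):
--     # casefold words/states
--     states = [state.casefold() for state in states]
--     words = [word.casefold() for word in words]
--
--     mackerels = {state: 0 for state in states}
--     for word in words:
--         state = mackerel_state(states, word)
--         if state is not None:
--             mackerels[state] += 1
--     return mackerels
-- ===== SOURCE B (Python) =====
-- def count_mackerels(states, words):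
--     # casefold words/states
--     states = [state.casefold() for state in states]
--     masks = [_letters(state) for state in states]
--     # A word's verdict depends only on the SET of its letters, so collapse the
--     # word list into a multiplicity table keyed by letter-set bitmask, then
--     # scan the states once per DISTINCT letter-set and add multiplicities.
--     groups = {}
--     for word in words:
--         wm = _letters(word.casefold())
--         groups[wm] = groups.get(wm, 0) + 1
--     counts = {state: 0 for state in states}
--     for wm, mult in groups.items():
--         hits = [state for state, m in zip(states, masks) if m & wm == 0]
--         if len(hits) == 1:
--             counts[hits[0]] += mult
--     return counts
--
-- def _letters(s):
--     m = 0
--     for c in s: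
--         m |= 1 << ord(c)
--     return m
-- ===== Notes on version B (the rewrite author's own statement) =====
-- stated objective: faster
-- what changed: B restructures the computation into staged passes: it collapses the word list into a multiplicity table keyed by letter-set bitmask (a word's verdict depends only on the set of its letters), then scans the states once per DISTINCT letter-set and adds multiplicities, instead of A's per-word scan that rebuilds and intersects Python sets for every (word, state) pair.
import Mathlib
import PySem

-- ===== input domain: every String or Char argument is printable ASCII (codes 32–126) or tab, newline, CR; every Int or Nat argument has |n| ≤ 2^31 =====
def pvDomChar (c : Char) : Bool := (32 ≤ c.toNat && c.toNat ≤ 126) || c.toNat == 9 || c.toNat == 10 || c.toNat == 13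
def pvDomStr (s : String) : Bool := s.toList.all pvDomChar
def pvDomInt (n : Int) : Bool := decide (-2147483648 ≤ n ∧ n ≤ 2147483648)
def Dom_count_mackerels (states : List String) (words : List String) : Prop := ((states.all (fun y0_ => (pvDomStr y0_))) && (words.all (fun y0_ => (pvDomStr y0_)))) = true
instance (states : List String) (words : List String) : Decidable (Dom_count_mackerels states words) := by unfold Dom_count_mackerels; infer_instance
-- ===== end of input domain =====

-- B groups the words by letter-set bitmask first (a word's verdict depends only on its set of
-- letters) and scans the states once per distinct letter-set, adding multiplicities (objective:
-- faster). Both ports render str.casefold as ASCII lowercasing, exact on Dom.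

-- ===== PORT A =====
def mackerel_state (states : List String) (word : String) : Option String :=
  -- [state for state in states if not (set(state) & set(word))]; 'not s' on a set is emptiness
  let mackerel_states := states.filter (fun state =>
    (PySem.Set.inter (PySem.Set.ofList state.toList) (PySem.Set.ofList word.toList)).isEmpty)
  if mackerel_states.length = 1 then some mackerel_states.headI else none

def count_mackerels (states : List String) (words : List String) : List (String × Int) :=
  let states := states.map PySem.Str.lower   -- state.casefold(): = lower on the ASCII domain
  let words := words.map PySem.Str.lower
  let mackerels : PySem.Dict String Int := states.foldl (fun d s => d.insert s 0) PySem.Dict.empty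
  let mackerels := words.foldl (fun d word =>
    match mackerel_state states word with
    | some state => d.modify state 0 (· + 1)   -- mackerels[state] += 1 (key always present)
    | none => d) mackerels
  mackerels.items

-- ===== PORT B =====
def pvLetters (s : String) : Nat := s.toList.foldl (fun m c => m ||| (1 <<< c.toNat)) 0

def count_mackerels_alt (states : List String) (words : List String) : List (String × Int) :=
  let states := states.map PySem.Str.lower   -- casefold = lower on ASCII
  let masks := states.map pvLetters
  -- groups[wm] = groups.get(wm, 0) + 1
  let groups : PySem.Dict Nat Int := words.foldl (fun d word =>
    let wm := pvLetters (PySem.Str.lower word)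
    d.insert wm (d.getD wm 0 + 1)) PySem.Dict.empty
  let counts : PySem.Dict String Int := states.foldl (fun d s => d.insert s 0) PySem.Dict.empty
  let counts := groups.items.foldl (fun d p =>
    let hits := ((states.zip masks).filter (fun sm => sm.2 &&& p.1 == 0)).map (·.1)
    if hits.length == 1 then d.modify hits.headI 0 (· + p.2) else d) counts
  counts.items

-- ===== PRECONDITION & SPEC =====
def Spec_count_mackerels (states : List String) (words : List String) (out : List (String × Int)) : Prop := out = count_mackerels_alt states words
instance (states : List String) (words : List String) (out : List (String × Int)) : Decidable (Spec_count_mackerels states words out) := by unfold Spec_count_mackerels; infer_instance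

-- ===== CLAIM (what is proved, stated in full; the proofs are below) =====
def Claim_equal_count_mackerels : Prop := ∀ (states : List String) (words : List String), Dom_count_mackerels states words → Spec_count_mackerels states words (count_mackerels states words)

-- ===== LEMMAS AND PROOFS =====

-- B's per-mask verdict, as a function (used only by the proofs)
def pvBhit (sts : List String) (m : Nat) : Option String :=
  if (sts.filter (fun s => pvLetters s &&& m == 0)).length == 1
  then some (sts.filter (fun s => pvLetters s &&& m == 0)).headI else none

-- a mask's bits name exactly the characters of the string
theorem pvLetters_testBit_gen (s : List Char) (init i : Nat) :
    (s.foldl (fun m c => m ||| (1 <<< c.toNat)) init).testBit i = true ↔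
      init.testBit i = true ∨ ∃ c ∈ s, c.toNat = i := by
  induction s generalizing init with
  | nil => simp
  | cons a t ih =>
    rw [List.foldl_cons, ih]
    simp [Nat.testBit_or, Nat.one_shiftLeft, Nat.testBit_two_pow]
    tauto

theorem pvLetters_testBit (s : String) (i : Nat) :
    (pvLetters s).testBit i = true ↔ ∃ c ∈ s.toList, c.toNat = i := by
  rw [pvLetters, pvLetters_testBit_gen]
  simp

theorem mask_disjoint_iff (s w : String) :
    (pvLetters s &&& pvLetters w == 0) =
      (PySem.Set.inter (PySem.Set.ofList s.toList) (PySem.Set.ofList w.toList)).isEmpty := by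
  rw [Bool.eq_iff_iff, beq_iff_eq, List.isEmpty_iff, List.eq_nil_iff_forall_not_mem]
  constructor
  · intro h y hy
    rw [PySem.Set.mem_inter, PySem.Set.mem_ofList, PySem.Set.mem_ofList] at hy
    have h1 : (pvLetters s).testBit y.toNat = true := (pvLetters_testBit s _).2 ⟨y, hy.1, rfl⟩
    have h2 : (pvLetters w).testBit y.toNat = true := (pvLetters_testBit w _).2 ⟨y, hy.2, rfl⟩
    have := congrArg (fun n => n.testBit y.toNat) h
    simp [Nat.testBit_and, h1, h2] at this
  · intro h
    apply Nat.eq_of_testBit_eq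
    intro i
    rw [Nat.testBit_and, Nat.zero_testBit]
    by_contra hb
    rcases Bool.and_eq_true_iff.1 (Bool.of_not_eq_false hb) with ⟨h1, h2⟩
    obtain ⟨c, hc, hci⟩ := (pvLetters_testBit s i).1 h1
    obtain ⟨d, hd, hdi⟩ := (pvLetters_testBit w i).1 h2
    have hcd : c = d := Char.ext (UInt32.toNat_inj.mp (hci.trans hdi.symm))
    exact h c (by rw [PySem.Set.mem_inter, PySem.Set.mem_ofList, PySem.Set.mem_ofList]; exact ⟨hc, hcd ▸ hd⟩)

-- A's per-word verdict IS B's verdict on the word's mask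
theorem mackerel_eq_bhit (sts : List String) (w : String) :
    mackerel_state sts w = pvBhit sts (pvLetters w) := by
  have hp : (fun s : String =>
      (PySem.Set.inter (PySem.Set.ofList s.toList) (PySem.Set.ofList w.toList)).isEmpty) =
      (fun s => pvLetters s &&& pvLetters w == 0) :=
    funext fun s => (mask_disjoint_iff s w).symm
  simp only [mackerel_state, pvBhit, hp, beq_iff_eq]

-- a fold whose body is 'match f x with some b => g d b | none => d' is a fold over filterMap
theorem foldl_step {α β δ : Type} (l : List α) (f : α → Option β) (g : δ → β → δ)
    (F : δ → α → δ) (hF : ∀ d x, F d x = match f x with | some b => g d b | none => d) (d : δ) :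
    l.foldl F d = (l.filterMap f).foldl g d := by
  induction l generalizing d with
  | nil => rfl
  | cons a t ih =>
    rw [List.foldl_cons, hF, List.filterMap_cons]
    cases h : f a <;> simp [ih]

theorem foldl_map_expl {α β δ : Type} (f : α → β) (g : δ → β → δ) (l : List α) (init : δ) :
    l.foldl (fun d x => g d (f x)) init = (l.map f).foldl g init := by
  induction l generalizing init with
  | nil => rfl
  | cons a t ih => simp [ih]

theorem zip_self_map {α β : Type} (l : List α) (f : α → β) :
    l.zip (l.map f) = l.map (fun a => (a, f a)) := by
  induction l with
  | nil => rfl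
  | cons a t ih => simp [ih]

-- B's verdict returns a state of the list
theorem bhit_mem {sts : List String} {m : Nat} {k : String} (h : pvBhit sts m = some k) :
    k ∈ sts := by
  unfold pvBhit at h
  split at h
  · cases hh : sts.filter (fun s => pvLetters s &&& m == 0) with
    | nil => rename_i hl; rw [hh] at hl; simp at hl
    | cons x t =>
      rw [hh] at h
      have hx : x ∈ sts := List.mem_of_mem_filter (hh ▸ List.mem_cons_self)
      have : k = x := by simpa [List.headI] using h.symm
      exact this ▸ hx
  · exact absurd h (by simp)

-- dict value after a fold of 'modify q.1 0 (· + q.2)'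
theorem getD_foldl_modify_pairs (l : List (String × Int)) (d : PySem.Dict String Int) (k : String) :
    (l.foldl (fun d q => d.modify q.1 0 (· + q.2)) d).getD k 0 =
      d.getD k 0 + ((l.filter (fun q => q.1 == k)).map (·.2)).sum := by
  induction l generalizing d with
  | nil => simp
  | cons a t ih =>
    rw [List.foldl_cons, ih, List.filter_cons]
    by_cases h : a.1 = k
    · simp [h, PySem.Dict.getD_modify]
      ring
    · simp [h, PySem.Dict.getD_modify, Ne.symm h]

-- a set update by elements already present is a no-op
theorem set_update_subset (s : PySem.Set String) (l : List String) (h : ∀ x ∈ l, x ∈ s) :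
    PySem.Set.update s l = s := by
  rw [PySem.Set.update_eq_append_filter]
  have : (PySem.Set.ofList l).filter (fun y => !(PySem.Set.contains s y)) = [] := by
    rw [List.filter_eq_nil_iff]
    intro y hy
    have hc := (PySem.Set.contains_iff s y).2 (h y ((PySem.Set.mem_ofList l y).1 hy))
    simp only [hc, Bool.not_true]
    exact Bool.false_ne_true
  rw [this, List.append_nil]

theorem count_filterMap {α β : Type} [DecidableEq β] (l : List α) (f : α → Option β) (k : β) :
    (l.filterMap f).count k = l.countP (fun x => f x == some k) := by
  induction l with
  | nil => rfl
  | cons a t ih =>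
    rw [List.filterMap_cons, List.countP_cons]
    cases h : f a with
    | none => simp [ih, h]
    | some b =>
      by_cases hb : b = k
      · simp [ih, h, hb, List.count_cons]
      · simp [ih, h, hb, List.count_cons, Ne.symm hb]

theorem countP_split (a : Nat) (p : Nat → Bool) (ms : List Nat) :
    ms.countP p =
      (ms.filter (fun m => !(m == a))).countP p + (if p a then ms.count a else 0) := by
  induction ms with
  | nil => simp
  | cons b t ih =>
    by_cases hb : b = a
    · subst hb
      by_cases hp : p b <;> simp [List.countP_cons, List.count_cons, hp, ih] <;> omega
    · by_cases hp : p b <;>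
        simp [List.countP_cons, List.count_cons, hp, hb, ih, List.filter_cons] <;> omega

-- the key counting identity: summing multiplicities over the distinct elements = counting directly
theorem sum_count_dedup (p : Nat → Bool) :
    ∀ (u ms : List Nat), u.Nodup → (∀ m, m ∈ u ↔ m ∈ ms) →
      (((u.filter p).map (fun m => (ms.count m : Int))).sum = (ms.countP p : Int)) := by
  intro u
  induction u with
  | nil =>
    intro ms _ hmem
    have : ms = [] := List.eq_nil_iff_forall_not_mem.2 fun x hx => by
      exact absurd ((hmem x).2 hx) (List.not_mem_nil)
    simp [this]
  | cons a t ih =>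
    intro ms hnd hmem
    have hat : a ∉ t := (List.nodup_cons.1 hnd).1
    have hndt : t.Nodup := (List.nodup_cons.1 hnd).2
    set ms' := ms.filter (fun m => !(m == a)) with hms'
    have hmem' : ∀ m, m ∈ t ↔ m ∈ ms' := by
      intro m
      constructor
      · intro hm
        have hma : m ≠ a := fun e => hat (e ▸ hm)
        have : m ∈ ms := (hmem m).1 (List.mem_cons_of_mem _ hm)
        simp [hms', List.mem_filter, this, hma]
      · intro hm
        rw [hms', List.mem_filter] at hm
        have hma : m ≠ a := by simpa using hm.2
        have := (hmem m).2 hm.1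
        rcases List.mem_cons.1 this with h | h
        · exact absurd h hma
        · exact h
    have hIH := ih ms' hndt hmem'
    have hcnt : ∀ m ∈ t.filter p, (ms.count m : Int) = (ms'.count m : Int) := by
      intro m hm
      have hmt : m ∈ t := List.mem_of_mem_filter hm
      have hma : m ≠ a := fun e => hat (e ▸ hmt)
      rw [hms', List.count_filter]
      simp [hma]
    have hsplit := countP_split a p ms
    by_cases hp : p a
    · rw [List.filter_cons_of_pos hp, List.map_cons, List.sum_cons,
        List.map_congr_left hcnt, hIH, hsplit]
      simp [hp]
      rw [hms']
      push_cast
      ring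
    · rw [List.filter_cons_of_neg (by simp [hp]),
        List.map_congr_left hcnt, hIH, hsplit]
      simp [hp]
      rw [hms']


-- the initial dict of zeros looks up to 0 at every key
theorem getD_fold_insert_zero (l : List String) (d : PySem.Dict String Int)
    (h : ∀ k, d.getD k 0 = 0) (k : String) :
    (l.foldl (fun d s => d.insert s 0) d).getD k 0 = 0 := by
  induction l generalizing d with
  | nil => exact h k
  | cons a t ih =>
    rw [List.foldl_cons]
    refine ih _ (fun k' => ?_)
    rw [PySem.Dict.getD_insert]
    split
    · rfl
    · exact h k'

-- items of a pair-modify fold over the zero dict: one entry per distinct state, value = sum of hits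
theorem items_modify_fold (sts : List String) (l : List (String × Int))
    (hl : ∀ q ∈ l, q.1 ∈ sts) :
    (l.foldl (fun d q => d.modify q.1 0 (· + q.2))
       (sts.foldl (fun d s => d.insert s 0) PySem.Dict.empty)).items =
    (PySem.Set.ofList sts).map
      (fun k => (k, ((l.filter (fun q => q.1 == k)).map (·.2)).sum)) := by
  have hkeys : (l.foldl (fun d q => d.modify q.1 0 (· + q.2))
      (sts.foldl (fun d s => d.insert s 0) PySem.Dict.empty)).keys = PySem.Set.ofList sts := by
    rw [PySem.Dict.keys_foldl_modify_key, PySem.Dict.keys_foldl_insert,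
      PySem.Dict.keys_empty, PySem.Set.update_nil_left]
    refine set_update_subset _ _ (fun x hx => ?_)
    obtain ⟨q, hq, rfl⟩ := List.mem_map.1 hx
    exact (PySem.Set.mem_ofList sts q.1).2 (hl q hq)
  have hnd : (l.foldl (fun d q => d.modify q.1 0 (· + q.2))
      (sts.foldl (fun d s => d.insert s 0) PySem.Dict.empty)).keys.Nodup := by
    rw [hkeys]; exact PySem.Set.nodup_ofList sts
  rw [PySem.Dict.items_eq_map_keys _ hnd 0, hkeys]
  refine List.map_congr_left (fun k _ => ?_)
  rw [getD_foldl_modify_pairs, getD_fold_insert_zero sts PySem.Dict.empty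
    (fun k' => PySem.Dict.getD_empty k' 0) k, zero_add]

-- A-side per-key value: the filter-sum over unit pairs is the plain count
theorem sum_ones_filter (ks : List String) (k : String) :
    (((ks.map (fun k' => (k', (1 : Int)))).filter (fun q => q.1 == k)).map (·.2)).sum
      = (ks.count k : Int) := by
  induction ks with
  | nil => simp
  | cons a t ih =>
    by_cases h : a = k
    · simp [h, List.count_cons, ih]
      push_cast
      ring
    · simp [h, List.count_cons, ih, Ne.symm h]

-- B-side per-key value: the filter-sum over the grouped pairs keeps one summand per hit mask
theorem pairs_filter_sum (sts : List String) (u : List Nat) (C : Nat → Int) (k : String) :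
    (((u.filterMap (fun m => (pvBhit sts m).map (fun k' => (k', C m)))).filter
        (fun q => q.1 == k)).map (·.2)).sum
      = ((u.filter (fun m => pvBhit sts m == some k)).map (fun m => C m)).sum := by
  induction u with
  | nil => simp
  | cons a t ih =>
    rw [List.filterMap_cons, List.filter_cons]
    cases h : pvBhit sts a with
    | none => simpa [h] using ih
    | some k' =>
      by_cases hk : k' = k
      · simp [h, hk, List.filter_cons, ih]
      · simp [h, hk, List.filter_cons, ih, Ne.symm hk]

-- A's dict fold, characterized entry by entry
theorem A_items (sts ws : List String) :
    (ws.foldl (fun d word =>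
        match mackerel_state sts word with
        | some state => d.modify state 0 (· + (1 : Int))
        | none => d) (sts.foldl (fun d s => d.insert s 0) PySem.Dict.empty)).items
    = (PySem.Set.ofList sts).map (fun k =>
        (k, ((ws.map pvLetters).countP (fun m => pvBhit sts m == some k) : Int))) := by
  refine Eq.trans (congrArg PySem.Dict.items (foldl_step ws (mackerel_state sts)
    (fun (d : PySem.Dict String Int) (state : String) =>
      d.modify state 0 (· + (1 : Int))) _
    (fun d w => by cases h : mackerel_state sts w <;> simp [h]) _)) ?_
  have h1 : (ws.filterMap (mackerel_state sts)).foldl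
      (fun d state => d.modify state 0 (· + (1 : Int)))
      (sts.foldl (fun d s => d.insert s 0) PySem.Dict.empty)
    = ((ws.filterMap (mackerel_state sts)).map (fun k => (k, (1 : Int)))).foldl
      (fun d q => d.modify q.1 0 (· + q.2))
      (sts.foldl (fun d s => d.insert s 0) PySem.Dict.empty) :=
    foldl_map_expl (fun k => (k, (1 : Int)))
      (fun (d : PySem.Dict String Int) (q : String × Int) => d.modify q.1 0 (· + q.2))
      (ws.filterMap (mackerel_state sts))
      (sts.foldl (fun d s => d.insert s 0) PySem.Dict.empty)
  rw [h1, items_modify_fold]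
  · refine List.map_congr_left (fun k _ => ?_)
    rw [sum_ones_filter, count_filterMap]
    have hfn : (fun w => mackerel_state sts w == some k)
        = (fun w => pvBhit sts (pvLetters w) == some k) :=
      funext fun w => by rw [mackerel_eq_bhit]
    rw [hfn, List.countP_map]
    rfl
  · intro q hq
    obtain ⟨k', hk', rfl⟩ := List.mem_map.1 hq
    obtain ⟨w, _, hm⟩ := List.mem_filterMap.1 hk'
    exact bhit_mem (mackerel_eq_bhit sts w ▸ hm)

-- B's dict fold over the grouped masks, characterized entry by entry: the same table
theorem B_items (sts ws : List String) :
    ((PySem.Dict.counter (ws.map pvLetters) : PySem.Dict Nat Int).items.foldl (fun d p =>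
        match (pvBhit sts p.1).map (fun k => (k, p.2)) with
        | some q => d.modify q.1 0 (· + q.2)
        | none => d) (sts.foldl (fun d s => d.insert s 0) PySem.Dict.empty)).items
    = (PySem.Set.ofList sts).map (fun k =>
        (k, ((ws.map pvLetters).countP (fun m => pvBhit sts m == some k) : Int))) := by
  refine Eq.trans (congrArg PySem.Dict.items
    (foldl_step (PySem.Dict.counter (ws.map pvLetters) : PySem.Dict Nat Int).items
      (fun p => (pvBhit sts p.1).map (fun k => (k, p.2)))
      (fun (d : PySem.Dict String Int) (q : String × Int) =>
        d.modify q.1 0 (· + q.2)) _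
      (fun d p => by cases h : (pvBhit sts p.1).map (fun k => (k, p.2)) <;> simp [h]) _)) ?_
  rw [PySem.Dict.items_counter, List.filterMap_map]
  have hcomp : ((fun p : Nat × Int => (pvBhit sts p.1).map (fun k => (k, p.2))) ∘
      (fun m : Nat => (m, ((ws.map pvLetters).count m : Int))))
      = (fun m => (pvBhit sts m).map (fun k' => (k', ((ws.map pvLetters).count m : Int)))) := rfl
  rw [hcomp, items_modify_fold]
  · refine List.map_congr_left (fun k _ => ?_)
    rw [pairs_filter_sum]
    exact congrArg (fun z => (k, z)) (sum_count_dedup _ _ _ (PySem.Set.nodup_ofList _)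
      (fun m => PySem.Set.mem_ofList _ m))
  · intro q hq
    obtain ⟨m, _, hm⟩ := List.mem_filterMap.1 hq
    cases hb : pvBhit sts m with
    | none => rw [hb] at hm; exact absurd hm (by simp)
    | some k' =>
      rw [hb] at hm
      have : q.1 = k' := by
        have := (Option.map_eq_some_iff).1 hm
        obtain ⟨a, ha, rfl⟩ := this
        cases ha; rfl
      exact this ▸ bhit_mem hb

-- ===== VERDICT (by name: the statement is the Claim_ definition above) =====
theorem count_mackerels_spec : Claim_equal_count_mackerels := by
  intro states words _
  show count_mackerels states words = count_mackerels_alt states words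
  have hA : count_mackerels states words
      = (PySem.Set.ofList (states.map PySem.Str.lower)).map (fun k =>
          (k, (((words.map PySem.Str.lower).map pvLetters).countP
            (fun m => pvBhit (states.map PySem.Str.lower) m == some k) : Int))) :=
    A_items (states.map PySem.Str.lower) (words.map PySem.Str.lower)
  have hg : words.foldl (fun d word =>
        d.insert (pvLetters (PySem.Str.lower word))
          (d.getD (pvLetters (PySem.Str.lower word)) 0 + 1)) PySem.Dict.empty
      = PySem.Dict.counter ((words.map PySem.Str.lower).map pvLetters) := by
    rw [← PySem.Dict.foldl_insert_getD_add_one_eq_counter, List.map_map]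
    exact foldl_map_expl (pvLetters ∘ PySem.Str.lower)
      (fun (d : PySem.Dict Nat Int) x => d.insert x (d.getD x 0 + 1)) words PySem.Dict.empty
  have hbody : (fun (d : PySem.Dict String Int) (p : Nat × Int) =>
        let hits := (((states.map PySem.Str.lower).zip
            ((states.map PySem.Str.lower).map pvLetters)).filter
            (fun sm => sm.2 &&& p.1 == 0)).map (·.1)
        if hits.length == 1 then d.modify hits.headI 0 (· + p.2) else d)
      = (fun d p => match (pvBhit (states.map PySem.Str.lower) p.1).map (fun k => (k, p.2)) with
          | some q => d.modify q.1 0 (· + q.2)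
          | none => d) := by
    funext d p
    have hz : (((states.map PySem.Str.lower).zip
          ((states.map PySem.Str.lower).map pvLetters)).filter
          (fun sm => sm.2 &&& p.1 == 0)).map (·.1)
        = (states.map PySem.Str.lower).filter (fun s => pvLetters s &&& p.1 == 0) := by
      rw [zip_self_map]
      simp [List.filter_map, Function.comp_def]
    simp only [hz]
    by_cases hlen : (((states.map PySem.Str.lower).filter
        (fun s => pvLetters s &&& p.1 == 0)).length == 1) = true
    · simp [pvBhit, hlen]
    · simp [pvBhit, hlen]
  have hB : count_mackerels_alt states words
      = (PySem.Set.ofList (states.map PySem.Str.lower)).map (fun k =>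
          (k, (((words.map PySem.Str.lower).map pvLetters).countP
            (fun m => pvBhit (states.map PySem.Str.lower) m == some k) : Int))) := by
    show (((words.foldl (fun d word =>
        d.insert (pvLetters (PySem.Str.lower word))
          (d.getD (pvLetters (PySem.Str.lower word)) 0 + 1)) PySem.Dict.empty :
          PySem.Dict Nat Int).items.foldl (fun d p =>
        let hits := (((states.map PySem.Str.lower).zip
            ((states.map PySem.Str.lower).map pvLetters)).filter
            (fun sm => sm.2 &&& p.1 == 0)).map (·.1)
        if hits.length == 1 then d.modify hits.headI 0 (· + p.2) else d)
        ((states.map PySem.Str.lower).foldl (fun d s => d.insert s 0) PySem.Dict.empty)).items) = _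
    rw [hg, hbody]
    exact B_items (states.map PySem.Str.lower) (words.map PySem.Str.lower)
  rw [hA, hB]
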